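-- pv_equiv track=rewrite | github.com/c-tram/Big-Brother | mlb-analytics-backend/src/services/complete_mlb_api.py | _analyze_game_performance
-- ===== SOURCE A (Python) =====
-- from typing import Dict, List, Optional, Any, Union
--
-- def _analyze_game_performance(pitches: List[Dict], events: List[Dict]) -> Dict:
--     """Analyze player performance in a specific game"""
--     summary = {
--         'pitches_seen': len(pitches),
--         'plate_appearances': len(events),
--         'hits': 0,
--         'home_runs': 0,
--         'strikeouts': 0,
--         'walks': 0
--     }
--
--     for event in events:
--         event_type = event.get('event_type', '')
--         if event_type in ['Single', 'Double', 'Triple', 'Home Run']: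
--             summary['hits'] += 1
--         if event_type == 'Home Run':
--             summary['home_runs'] += 1
--         if event_type == 'Strikeout':
--             summary['strikeouts'] += 1
--         if event_type == 'Walk':
--             summary['walks'] += 1
--
--     return summary
-- ===== SOURCE B (Python) =====
-- from typing import Dict, List
--
-- def _analyze_game_performance(pitches: List[Dict], events: List[Dict]) -> Dict:
--     """Analyze player performance in a specific game."""
--     # Project once to the list of event types, then take one full counting
--     # pass per category with list.count, instead of branching per event.
--     types = [e.get('event_type', '') for e in events]
--     return {
--         'pitches_seen': len(pitches),
--         'plate_appearances': len(events),
--         'hits': sum(types.count(t) for t in ('Single', 'Double', 'Triple', 'Home Run')),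
--         'home_runs': types.count('Home Run'),
--         'strikeouts': types.count('Strikeout'),
--         'walks': types.count('Walk'),
--     }
-- ===== Notes on version B (the rewrite author's own statement) =====
-- stated objective: alternative
-- what changed: Instead of one pass over events that branches per event and mutates a summary dict, B first projects the event-type list and then performs a separate list.count scan per category, building the result dict in one expression.
import Mathlib
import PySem

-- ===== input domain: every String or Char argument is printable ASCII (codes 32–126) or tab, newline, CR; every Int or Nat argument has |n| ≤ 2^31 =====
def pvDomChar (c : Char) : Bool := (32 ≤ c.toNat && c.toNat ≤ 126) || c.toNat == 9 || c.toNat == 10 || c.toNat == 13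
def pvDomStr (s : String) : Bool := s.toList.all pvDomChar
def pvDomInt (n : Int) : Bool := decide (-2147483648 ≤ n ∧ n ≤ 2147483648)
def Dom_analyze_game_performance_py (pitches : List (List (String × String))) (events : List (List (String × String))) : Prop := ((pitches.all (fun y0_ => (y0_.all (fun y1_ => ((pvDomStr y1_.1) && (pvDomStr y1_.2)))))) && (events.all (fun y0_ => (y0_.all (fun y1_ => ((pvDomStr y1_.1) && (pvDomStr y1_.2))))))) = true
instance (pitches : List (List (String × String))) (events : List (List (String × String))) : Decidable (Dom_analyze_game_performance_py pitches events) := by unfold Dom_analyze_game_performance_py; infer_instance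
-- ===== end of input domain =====

-- B replaces A's single branching pass (mutating a summary dict per event) by a projection
-- to the event-type list plus one list.count scan per category (alternative; same order of cost).


-- ===== PORT A =====
def analyze_game_performance_py (pitches : List (List (String × String))) (events : List (List (String × String))) : List (String × Int) :=
  let summary : PySem.Dict String Int := PySem.Dict.ofList
    [("pitches_seen", (pitches.length : Int)),
     ("plate_appearances", (events.length : Int)),
     ("hits", 0), ("home_runs", 0), ("strikeouts", 0), ("walks", 0)]
  let final := events.foldl (fun s event =>
    let event_type := PySem.Dict.getD (PySem.Dict.mk event) "event_type" ""
    let s := if event_type ∈ ["Single", "Double", "Triple", "Home Run"] then s.modify "hits" 0 (· + 1) else s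
    let s := if event_type = "Home Run" then s.modify "home_runs" 0 (· + 1) else s
    let s := if event_type = "Strikeout" then s.modify "strikeouts" 0 (· + 1) else s
    let s := if event_type = "Walk" then s.modify "walks" 0 (· + 1) else s
    s) summary
  final.items

-- ===== PORT B =====
def analyze_game_performance_py_alt (pitches : List (List (String × String))) (events : List (List (String × String))) : List (String × Int) :=
  let types := events.map (fun e => PySem.Dict.getD (PySem.Dict.mk e) "event_type" "")
  [("pitches_seen", (pitches.length : Int)),
   ("plate_appearances", (events.length : Int)),
   ("hits", (["Single", "Double", "Triple", "Home Run"].map (fun t => PySem.List.count types t)).sum),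
   ("home_runs", PySem.List.count types "Home Run"),
   ("strikeouts", PySem.List.count types "Strikeout"),
   ("walks", PySem.List.count types "Walk")]

-- ===== PRECONDITION & SPEC =====
def Spec_analyze_game_performance_py (pitches : List (List (String × String))) (events : List (List (String × String))) (out : List (String × Int)) : Prop := out = analyze_game_performance_py_alt pitches events
instance (pitches : List (List (String × String))) (events : List (List (String × String))) (out : List (String × Int)) : Decidable (Spec_analyze_game_performance_py pitches events out) := by unfold Spec_analyze_game_performance_py; infer_instance

-- ===== CLAIM (what is proved, stated in full; the proofs are below) =====
def Claim_equal_analyze_game_performance_py : Prop := ∀ (pitches : List (List (String × String))) (events : List (List (String × String))), Dom_analyze_game_performance_py pitches events → Spec_analyze_game_performance_py pitches events (analyze_game_performance_py pitches events)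

-- ===== LEMMAS AND PROOFS =====

-- The loop step of port A, over the extracted event type.
def pvStep (s : PySem.Dict String Int) (event_type : String) : PySem.Dict String Int :=
  let s := if event_type ∈ ["Single", "Double", "Triple", "Home Run"] then s.modify "hits" 0 (· + 1) else s
  let s := if event_type = "Home Run" then s.modify "home_runs" 0 (· + 1) else s
  let s := if event_type = "Strikeout" then s.modify "strikeouts" 0 (· + 1) else s
  let s := if event_type = "Walk" then s.modify "walks" 0 (· + 1) else s
  s

def pvState (p q h r k w : Int) : PySem.Dict String Int :=
  PySem.Dict.mk
    [("pitches_seen", p), ("plate_appearances", q),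
     ("hits", h), ("home_runs", r), ("strikeouts", k), ("walks", w)]

lemma pvStep_single (p q h r k w : Int) :
    pvStep (pvState p q h r k w) "Single" = pvState p q (h+1) r k w := rfl
lemma pvStep_double (p q h r k w : Int) :
    pvStep (pvState p q h r k w) "Double" = pvState p q (h+1) r k w := rfl
lemma pvStep_triple (p q h r k w : Int) :
    pvStep (pvState p q h r k w) "Triple" = pvState p q (h+1) r k w := rfl
lemma pvStep_hr (p q h r k w : Int) :
    pvStep (pvState p q h r k w) "Home Run" = pvState p q (h+1) (r+1) k w := rfl
lemma pvStep_so (p q h r k w : Int) :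
    pvStep (pvState p q h r k w) "Strikeout" = pvState p q h r (k+1) w := rfl
lemma pvStep_walk (p q h r k w : Int) :
    pvStep (pvState p q h r k w) "Walk" = pvState p q h r k (w+1) := rfl
lemma pvStep_other (p q h r k w : Int) (t : String)
    (h1 : t ≠ "Single") (h2 : t ≠ "Double") (h3 : t ≠ "Triple") (h4 : t ≠ "Home Run")
    (h5 : t ≠ "Strikeout") (h6 : t ≠ "Walk") :
    pvStep (pvState p q h r k w) t = pvState p q h r k w := by
  simp [pvStep, h1, h2, h3, h4, h5, h6]

lemma pvFold_inv (ts : List String) (p q h r k w : Int) :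
    ts.foldl pvStep (pvState p q h r k w) =
    pvState p q
      (h + ts.count "Single" + ts.count "Double" + ts.count "Triple" + ts.count "Home Run")
      (r + ts.count "Home Run") (k + ts.count "Strikeout") (w + ts.count "Walk") := by
  induction ts generalizing h r k w with
  | nil => simp
  | cons t ts ih =>
    rw [List.foldl_cons]
    by_cases h1 : t = "Single"
    · subst h1
      rw [pvStep_single, ih]
      simp only [pvState, List.count_cons, PySem.Dict.mk.injEq, List.cons.injEq,
        Prod.mk.injEq, true_and, and_true]
      norm_num
      omega
    by_cases h2 : t = "Double"
    · subst h2
      rw [pvStep_double, ih]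
      simp only [pvState, List.count_cons, PySem.Dict.mk.injEq, List.cons.injEq,
        Prod.mk.injEq, true_and, and_true]
      norm_num
      omega
    by_cases h3 : t = "Triple"
    · subst h3
      rw [pvStep_triple, ih]
      simp only [pvState, List.count_cons, PySem.Dict.mk.injEq, List.cons.injEq,
        Prod.mk.injEq, true_and, and_true]
      norm_num
      omega
    by_cases h4 : t = "Home Run"
    · subst h4
      rw [pvStep_hr, ih]
      simp only [pvState, List.count_cons, PySem.Dict.mk.injEq, List.cons.injEq,
        Prod.mk.injEq, true_and, and_true]
      norm_num
      omega
    by_cases h5 : t = "Strikeout"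
    · subst h5
      rw [pvStep_so, ih]
      simp only [pvState, List.count_cons, PySem.Dict.mk.injEq, List.cons.injEq,
        Prod.mk.injEq, true_and, and_true]
      norm_num
      omega
    by_cases h6 : t = "Walk"
    · subst h6
      rw [pvStep_walk, ih]
      simp only [pvState, List.count_cons, PySem.Dict.mk.injEq, List.cons.injEq,
        Prod.mk.injEq, true_and, and_true]
      norm_num
      omega
    · rw [pvStep_other p q h r k w t h1 h2 h3 h4 h5 h6, ih]
      simp [pvState, h1, h2, h3, h4, h5, h6]

lemma pvMain (pitches events : List (List (String × String))) :
    analyze_game_performance_py pitches events = analyze_game_performance_py_alt pitches events := by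
  show (events.foldl (fun s event =>
      let event_type := PySem.Dict.getD (PySem.Dict.mk event) "event_type" ""
      let s := if event_type ∈ ["Single", "Double", "Triple", "Home Run"] then s.modify "hits" 0 (· + 1) else s
      let s := if event_type = "Home Run" then s.modify "home_runs" 0 (· + 1) else s
      let s := if event_type = "Strikeout" then s.modify "strikeouts" 0 (· + 1) else s
      let s := if event_type = "Walk" then s.modify "walks" 0 (· + 1) else s
      s)
      (PySem.Dict.ofList
        [("pitches_seen", (pitches.length : Int)),
         ("plate_appearances", (events.length : Int)),
         ("hits", 0), ("home_runs", 0), ("strikeouts", 0), ("walks", 0)])).items =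
    analyze_game_performance_py_alt pitches events
  rw [show (events.foldl (fun s event =>
      let event_type := PySem.Dict.getD (PySem.Dict.mk event) "event_type" ""
      let s := if event_type ∈ ["Single", "Double", "Triple", "Home Run"] then s.modify "hits" 0 (· + 1) else s
      let s := if event_type = "Home Run" then s.modify "home_runs" 0 (· + 1) else s
      let s := if event_type = "Strikeout" then s.modify "strikeouts" 0 (· + 1) else s
      let s := if event_type = "Walk" then s.modify "walks" 0 (· + 1) else s
      s)
      (PySem.Dict.ofList
        [("pitches_seen", (pitches.length : Int)),
         ("plate_appearances", (events.length : Int)),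
         ("hits", 0), ("home_runs", 0), ("strikeouts", 0), ("walks", 0)])) =
      ((events.map (fun e => PySem.Dict.getD (PySem.Dict.mk e) "event_type" "")).foldl pvStep
        (pvState (pitches.length : Int) (events.length : Int) 0 0 0 0)) from by
    rw [List.foldl_map]; rfl]
  rw [pvFold_inv]
  simp [analyze_game_performance_py_alt, pvState, PySem.List.count_eq]
  ring

-- ===== VERDICT (by name: the statement is the Claim_ definition above) =====
theorem analyze_game_performance_py_spec : Claim_equal_analyze_game_performance_py := by
  intro pitches events _
  exact pvMain pitches events
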